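-- pv_equiv track=rewrite | github.com/mohammedumar08/ServiceCheck | backend/services/verdict_engine.py | _pick_rule
-- ===== SOURCE A (Python) =====
-- def _pick_rule(rules, engine):
--     """Select the best rule, preferring engine-specific matches."""
--     if engine:
--         for r in rules:
--             re = r.get("engine")
--             if re and re == engine:
--                 return r
--         for r in rules:
--             re = r.get("engine")
--             if re == "non-turbo" and engine != "2.5T":
--                 return r
--     # Prefer non-engine-specific, or flexible over fixed
--     generic = [r for r in rules if not r.get("engine")]
--     if generic:
--         flex = [r for r in generic if r.get("interval_type") == "flexible" or r.get("maintenance_mode") == "flexible"]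
--         if flex:
--             return flex[0]
--         return generic[0]
--     return rules[0]
-- ===== SOURCE B (Python) =====
-- def _pick_rule(rules, engine):
--     """Single linear pass: rank each rule into a priority tier and keep the
--     best-ranked rule seen so far (earliest wins ties); rules[0] fallback
--     raises IndexError on empty input just like the multi-pass version."""
--     best = None
--     for r in rules:
--         re = r.get("engine")
--         if engine and re and re == engine:
--             t = 1
--         elif engine and engine != "2.5T" and re == "non-turbo":
--             t = 2
--         elif not re and (r.get("interval_type") == "flexible" or r.get("maintenance_mode") == "flexible"):
--             t = 3
--         elif not re:
--             t = 4
--         else: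
--             t = 5
--         if best is None or t < best[0]:
--             best = (t, r)
--     if best is None:
--         return rules[0]
--     return best[1]
-- ===== Notes on version B (the rewrite author's own statement) =====
-- stated objective: alternative
-- what changed: Replaced A's four sequential filtered passes (engine-exact scan, non-turbo scan, generic filter, flexible filter) by one linear pass that assigns each rule a priority tier and keeps the earliest best-tier rule.
import Mathlib
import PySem

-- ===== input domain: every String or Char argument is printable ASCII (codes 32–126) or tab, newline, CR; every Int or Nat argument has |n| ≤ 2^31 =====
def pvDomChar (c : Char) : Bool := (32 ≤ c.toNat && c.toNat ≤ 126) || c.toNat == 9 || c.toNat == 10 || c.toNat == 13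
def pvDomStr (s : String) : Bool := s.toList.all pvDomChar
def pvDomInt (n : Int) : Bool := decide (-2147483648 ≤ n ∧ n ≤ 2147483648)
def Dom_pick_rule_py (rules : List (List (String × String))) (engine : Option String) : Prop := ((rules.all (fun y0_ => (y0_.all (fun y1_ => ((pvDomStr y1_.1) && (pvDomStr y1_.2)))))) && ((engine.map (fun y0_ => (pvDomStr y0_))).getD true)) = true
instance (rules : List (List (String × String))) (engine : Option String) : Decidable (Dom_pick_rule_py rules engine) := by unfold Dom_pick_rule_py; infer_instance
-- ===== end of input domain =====

-- B replaces A's four sequential filtered passes by one linear pass keeping the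
-- best priority tier seen so far (objective: alternative decomposition, same O(n) cost).
-- dict r → assoc list, r.get(k) = first match:
def pvGet (r : List (String × String)) (k : String) : Option String :=
  (r.find? (fun kv => kv.1 == k)).map (·.2)

-- Python truthiness of an optional string (None and "" are falsy)
def pvTruthy : Option String → Bool
  | none => false
  | some s => !(s == "")

-- ===== PORT A =====
def pick_rule_py (rules : List (List (String × String))) (engine : Option String) : List (String × String) :=
  -- the two early-return 'for' loops become find? chains (first match returned)
  let pass :=
    if pvTruthy engine then
      match rules.find? (fun r => pvTruthy (pvGet r "engine") && (pvGet r "engine" == engine)) with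
      | some r => some r
      | none => rules.find? (fun r => (pvGet r "engine" == some "non-turbo") && !(engine == some "2.5T"))
    else none
  match pass with
  | some r => r
  | none =>
    let generic := rules.filter (fun r => !(pvTruthy (pvGet r "engine")))
    if !generic.isEmpty then
      let flex := generic.filter (fun r =>
        (pvGet r "interval_type" == some "flexible") || (pvGet r "maintenance_mode" == some "flexible"))
      match flex.head? with
      | some f => f
      | none => generic.headD []
    else rules.headD []   -- rules[0]; empty rules raise IndexError in Python (excluded by Pre_)

-- ===== PORT B =====
-- the tier computation of Source B's loop body
def pvTier (engine : Option String) (r : List (String × String)) : Nat :=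
  let re := pvGet r "engine"
  if pvTruthy engine && pvTruthy re && (re == engine) then 1
  else if pvTruthy engine && !(engine == some "2.5T") && (re == some "non-turbo") then 2
  else if !(pvTruthy re) && ((pvGet r "interval_type" == some "flexible") || (pvGet r "maintenance_mode" == some "flexible")) then 3
  else if !(pvTruthy re) then 4
  else 5

-- the loop body of Source B ('if best is None or t < best[0]: best = (t, r)')
def pvStep (engine : Option String) (best : Option (Nat × List (String × String)))
    (r : List (String × String)) : Option (Nat × List (String × String)) :=
  let t := pvTier engine r
  match best with
  | none => some (t, r)
  | some (tb, rb) => if t < tb then some (t, r) else some (tb, rb)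

def pick_rule_py_alt (rules : List (List (String × String))) (engine : Option String) : List (String × String) :=
  let best := rules.foldl (pvStep engine) none
  match best with
  | none => rules.headD []   -- rules[0]; raises IndexError in Python on empty rules (excluded by Pre_)
  | some (_, rb) => rb

-- ===== PRECONDITION & SPEC =====
-- A (and B) raise IndexError exactly on empty `rules`; nothing else is excluded.
def Pre_pick_rule_py (rules : List (List (String × String))) (engine : Option String) : Prop :=
  rules ≠ []
instance (rules : List (List (String × String))) (engine : Option String) : Decidable (Pre_pick_rule_py rules engine) := by unfold Pre_pick_rule_py; infer_instance

def pvWitness_pick_rule_py : (List (List (String × String))) × Option String :=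
  ([[("engine", "non-turbo")], [("interval_type", "flexible")]], some "2.0T")

def Spec_pick_rule_py (rules : List (List (String × String))) (engine : Option String) (out : List (String × String)) : Prop := out = pick_rule_py_alt rules engine
instance (rules : List (List (String × String))) (engine : Option String) (out : List (String × String)) : Decidable (Spec_pick_rule_py rules engine out) := by unfold Spec_pick_rule_py; infer_instance

-- ===== CLAIM (what is proved, stated in full; the proofs are below) =====
def Claim_equal_pick_rule_py : Prop := ∀ (rules : List (List (String × String))) (engine : Option String), Dom_pick_rule_py rules engine → Pre_pick_rule_py rules engine → Spec_pick_rule_py rules engine (pick_rule_py rules engine)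

-- ===== LEMMAS AND PROOFS =====

-- recursive specification of B's loop: first element of minimal tier
def pvFirstMin (engine : Option String) : List (List (String × String)) → Option (List (String × String))
  | [] => none
  | r :: rs =>
    match pvFirstMin engine rs with
    | none => some r
    | some r' => if pvTier engine r ≤ pvTier engine r' then some r else some r'

-- the fold with a some-accumulator merges the accumulator with the fold from none
theorem pv_fold_some (engine : Option String) (l : List (List (String × String))) :
    ∀ (t : Nat) (b : List (String × String)),
    l.foldl (pvStep engine) (some (t, b))
    = match l.foldl (pvStep engine) none with
      | none => some (t, b)
      | some (t', b') => if t' < t then some (t', b') else some (t, b) := by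
  induction l with
  | nil => intro t b; rfl
  | cons r rs ih =>
    intro t b
    simp only [List.foldl_cons]
    have hstep : pvStep engine (some (t, b)) r
        = if pvTier engine r < t then some (pvTier engine r, r) else some (t, b) := rfl
    have hstep0 : pvStep engine none r = some (pvTier engine r, r) := rfl
    rw [hstep, hstep0, ih (pvTier engine r) r]
    by_cases h1 : pvTier engine r < t
    · rw [if_pos h1, ih]
      rcases rs.foldl (pvStep engine) none with _ | ⟨t', b'⟩
      · simp [h1]
      · by_cases h2 : t' < pvTier engine r <;> by_cases h3 : t' < t <;>
          simp [h2, h3] <;> omega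
    · rw [if_neg h1, ih]
      rcases rs.foldl (pvStep engine) none with _ | ⟨t', b'⟩
      · simp [h1]
      · by_cases h2 : t' < pvTier engine r <;> by_cases h3 : t' < t <;>
          simp [h2, h3] <;> omega

-- B's fold computes pvFirstMin (paired with its tier)
theorem pv_fold_eq_firstMin (engine : Option String) (l : List (List (String × String))) :
    l.foldl (pvStep engine) none = (pvFirstMin engine l).map (fun r => (pvTier engine r, r)) := by
  induction l with
  | nil => rfl
  | cons r rs ih =>
    simp only [List.foldl_cons, pvFirstMin]
    have hstep0 : pvStep engine none r = some (pvTier engine r, r) := rfl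
    rw [hstep0, pv_fold_some, ih]
    rcases pvFirstMin engine rs with _ | r'
    · rfl
    · simp only [Option.map_some]
      by_cases h : pvTier engine r' < pvTier engine r <;>
        by_cases h2 : pvTier engine r ≤ pvTier engine r' <;>
        simp [h, h2] <;> omega

theorem pv_alt_eq (rules : List (List (String × String))) (engine : Option String) :
    pick_rule_py_alt rules engine
    = match pvFirstMin engine rules with
      | none => rules.headD []
      | some r => r := by
  unfold pick_rule_py_alt
  rw [pv_fold_eq_firstMin]
  rcases pvFirstMin engine rules with _ | r <;> rfl

-- pvFirstMin returns an element of the list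
theorem pv_firstMin_mem (engine : Option String) :
    ∀ (l : List (List (String × String))) (r : List (String × String)),
    pvFirstMin engine l = some r → r ∈ l := by
  intro l
  induction l with
  | nil => intro r h; simp [pvFirstMin] at h
  | cons x xs ih =>
    intro r h
    simp only [pvFirstMin] at h
    rcases h2 : pvFirstMin engine xs with _ | r''
    · rw [h2] at h; simp at h; simp [h]
    · rw [h2] at h
      by_cases hle : pvTier engine x ≤ pvTier engine r'' <;> simp [hle] at h
      · simp [h]
      · exact List.mem_cons_of_mem _ (ih r (by rw [← h]; exact h2))

-- key lemma: if every tier is ≥ k and the first rule of tier k is r, then pvFirstMin = r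
theorem pv_firstMin_of_find (engine : Option String) (k : Nat)
    (r : List (String × String)) :
    ∀ (l : List (List (String × String))),
    (∀ x ∈ l, k ≤ pvTier engine x) →
    l.find? (fun x => pvTier engine x == k) = some r →
    pvFirstMin engine l = some r := by
  intro l
  induction l with
  | nil => intro _ h; simp at h
  | cons x xs ih =>
    intro hge hf
    by_cases hx : pvTier engine x = k
    · rw [List.find?_cons_of_pos (by simp [hx])] at hf
      injection hf with hf
      subst hf
      simp only [pvFirstMin]
      rcases hm : pvFirstMin engine xs with _ | r'
      · rfl
      · have hr' : r' ∈ xs := pv_firstMin_mem engine xs r' hm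
        have h1 := hge r' (List.mem_cons_of_mem _ hr')
        have h2 : pvTier engine x ≤ pvTier engine r' := by omega
        simp [h2]
    · rw [List.find?_cons_of_neg (by simp [hx])] at hf
      have hrec := ih (fun y hy => hge y (List.mem_cons_of_mem _ hy)) hf
      simp only [pvFirstMin, hrec]
      have hrk : pvTier engine r = k := by
        have := List.find?_some hf
        simpa using this
      have hxge : k ≤ pvTier engine x := hge x (List.mem_cons_self)
      have : ¬ pvTier engine x ≤ pvTier engine r := by omega
      simp [this]

-- find? respects pointwise-on-members equal predicates
theorem pv_find_congr {α : Type} (p q : α → Bool) :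
    ∀ (l : List α), (∀ x ∈ l, p x = q x) → l.find? p = l.find? q := by
  intro l
  induction l with
  | nil => intro _; rfl
  | cons x xs ih =>
    intro h
    rw [List.find?_cons, List.find?_cons, h x List.mem_cons_self,
      ih (fun y hy => h y (List.mem_cons_of_mem _ hy))]

-- no member of tier j when find? fails
theorem pv_no_tier (engine : Option String) (j : Nat) (l : List (List (String × String)))
    (h : l.find? (fun x => pvTier engine x == j) = none) :
    ∀ x ∈ l, pvTier engine x ≠ j := by
  intro x hx
  have := List.find?_eq_none.mp h x hx
  simpa using this

theorem pv_tier_range (engine : Option String) (r : List (String × String)) :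
    1 ≤ pvTier engine r ∧ pvTier engine r ≤ 5 := by
  constructor <;> (simp only [pvTier]; split_ifs <;> omega)

theorem pv_headD_of_head? {α : Type} (l : List α) (d g : α) (h : l.head? = some g) :
    l.headD d = g := by
  cases l with
  | nil => simp at h
  | cons x xs => simp at h; simpa using h

-- pointwise tier characterisations of A's predicates
theorem pv_tier1_iff (engine : Option String) (hE : pvTruthy engine = true)
    (x : List (String × String)) :
    (pvTruthy (pvGet x "engine") && (pvGet x "engine" == engine)) = (pvTier engine x == 1) := by
  simp only [pvTier]
  split_ifs with h1 h2 h3 h4 <;> simp_all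

theorem pv_tier2_iff (engine : Option String) (hE : pvTruthy engine = true)
    (x : List (String × String)) (h1 : pvTier engine x ≠ 1) :
    ((pvGet x "engine" == some "non-turbo") && !(engine == some "2.5T")) = (pvTier engine x == 2) := by
  revert h1
  simp only [pvTier]
  split_ifs with h1 h2 h3 h4 <;> intro hne <;> simp_all <;>
    (intro h; by_contra h25; exact h2 h25 h)

theorem pv_tier3_iff (engine : Option String) (x : List (String × String)) :
    (((pvGet x "interval_type" == some "flexible") || (pvGet x "maintenance_mode" == some "flexible"))
      && !(pvTruthy (pvGet x "engine"))) = (pvTier engine x == 3) := by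
  simp only [pvTier]
  split_ifs with h1 h2 h3 h4 <;> simp_all [pvTruthy]

theorem pv_tier4_iff (engine : Option String) (x : List (String × String))
    (h3 : pvTier engine x ≠ 3) :
    (!(pvTruthy (pvGet x "engine"))) = (pvTier engine x == 4) := by
  revert h3
  simp only [pvTier]
  split_ifs with h1 h2 h3 h4 <;> intro hne <;> simp_all [pvTruthy]

theorem pv_tier5 (engine : Option String) (x : List (String × String))
    (h1 : pvTier engine x ≠ 1) (h2 : pvTier engine x ≠ 2)
    (hpg : (!(pvTruthy (pvGet x "engine"))) = false) : pvTier engine x = 5 := by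
  revert h1 h2
  simp only [pvTier]
  split_ifs with g1 g2 g3 g4 <;> simp_all

theorem pv_tier_ge3 (engine : Option String) (hE : ¬ pvTruthy engine = true)
    (x : List (String × String)) : pvTier engine x ≠ 1 ∧ pvTier engine x ≠ 2 := by
  simp only [pvTier]
  split_ifs with h1 h2 h3 h4 <;> simp_all

-- the generic/flexible tail of A equals the first-minimal-tier rule once tiers 1 and 2 are absent
theorem pv_generic_part (engine : Option String) (rules : List (List (String × String)))
    (hne : rules ≠ [])
    (hno1 : ∀ x ∈ rules, pvTier engine x ≠ 1)
    (hno2 : ∀ x ∈ rules, pvTier engine x ≠ 2) :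
    (let generic := rules.filter (fun r => !(pvTruthy (pvGet r "engine")))
     if !generic.isEmpty then
       let flex := generic.filter (fun r =>
         (pvGet r "interval_type" == some "flexible") || (pvGet r "maintenance_mode" == some "flexible"))
       match flex.head? with
       | some f => f
       | none => generic.headD []
     else rules.headD [])
    = (match pvFirstMin engine rules with
       | none => rules.headD []
       | some r => r) := by
  simp only []
  have hflex : (List.filter (fun r =>
        (pvGet r "interval_type" == some "flexible") || (pvGet r "maintenance_mode" == some "flexible"))
        (rules.filter (fun r => !(pvTruthy (pvGet r "engine"))))).head?
      = rules.find? (fun x => pvTier engine x == 3) := by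
    rw [List.filter_filter, List.head?_filter]
    exact pv_find_congr _ _ rules (fun x _ => pv_tier3_iff engine x)
  rcases hf3 : rules.find? (fun x => pvTier engine x == 3) with _ | r3
  · -- no flexible generic rule
    have hno3 := pv_no_tier engine 3 rules hf3
    rw [hf3] at hflex
    by_cases hgen : (rules.filter (fun r => !(pvTruthy (pvGet r "engine")))).isEmpty = true
    · -- no generic rule at all: everything is tier 5, A returns rules[0]
      have hpg : ∀ x ∈ rules, (!(pvTruthy (pvGet x "engine"))) = false := by
        intro x hx
        by_contra h
        have h' : (!(pvTruthy (pvGet x "engine"))) = true := by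
          cases hb : (!(pvTruthy (pvGet x "engine"))) <;> simp_all
        have : x ∈ rules.filter (fun r => !(pvTruthy (pvGet r "engine"))) :=
          List.mem_filter.mpr ⟨hx, h'⟩
        rw [List.isEmpty_iff.mp hgen] at this
        simp at this
      rw [hgen]
      simp only [Bool.not_true]
      rw [if_neg (by simp)]
      rcases rules with _ | ⟨h0, t⟩
      · exact absurd rfl hne
      have ht5 : pvTier engine h0 = 5 :=
        pv_tier5 engine h0 (hno1 h0 List.mem_cons_self) (hno2 h0 List.mem_cons_self)
          (hpg h0 List.mem_cons_self)
      have hf5 : (h0 :: t).find? (fun x => pvTier engine x == 5) = some h0 :=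
        List.find?_cons_of_pos (by simp [ht5])
      have hge : ∀ x ∈ (h0 :: t), 5 ≤ pvTier engine x := by
        intro x hx
        have hr := pv_tier_range engine x
        have := hno1 x hx; have := hno2 x hx; have := hno3 x hx
        have h4f := pv_tier4_iff engine x (by omega)
        rw [hpg x hx] at h4f
        have hne4 : pvTier engine x ≠ 4 := by
          have := h4f.symm
          simp at this
          exact this
        omega
      rw [pv_firstMin_of_find engine 5 h0 (h0 :: t) hge hf5]
      rfl
    · -- generic nonempty, no flexible: A returns generic[0] = first tier-4 rule
      have hgen' : (rules.filter (fun r => !(pvTruthy (pvGet r "engine")))).isEmpty = false := by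
        cases hb : (rules.filter (fun r => !(pvTruthy (pvGet r "engine")))).isEmpty <;> simp_all
      rw [hgen']
      simp only [Bool.not_false]
      rw [if_pos trivial, hflex]
      have hhead : (rules.filter (fun r => !(pvTruthy (pvGet r "engine")))).head?
          = rules.find? (fun x => pvTier engine x == 4) := by
        rw [List.head?_filter]
        exact pv_find_congr _ _ rules (fun x hx => pv_tier4_iff engine x (hno3 x hx))
      rcases hf4 : rules.find? (fun x => pvTier engine x == 4) with _ | r4
      · rw [hf4] at hhead
        exact absurd (List.isEmpty_iff.mpr (List.head?_eq_none_iff.mp hhead)) hgen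
      · rw [hf4] at hhead
        have hge : ∀ x ∈ rules, 4 ≤ pvTier engine x := by
          intro x hx
          have hr := pv_tier_range engine x
          have := hno1 x hx; have := hno2 x hx; have := hno3 x hx
          omega
        rw [pv_firstMin_of_find engine 4 r4 rules hge hf4]
        exact pv_headD_of_head? _ [] r4 hhead
  · -- first flexible generic rule r3 wins
    have hmem : r3 ∈ rules := List.mem_of_find?_eq_some hf3
    have ht3 : pvTier engine r3 = 3 := by simpa using List.find?_some hf3
    have hpg3 : (!(pvTruthy (pvGet r3 "engine"))) = true := by
      have h := pv_tier3_iff engine r3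
      rw [ht3] at h
      simp at h
      simp [h.2]
    have hgen : (rules.filter (fun r => !(pvTruthy (pvGet r "engine")))).isEmpty = false := by
      have : r3 ∈ rules.filter (fun r => !(pvTruthy (pvGet r "engine"))) :=
        List.mem_filter.mpr ⟨hmem, hpg3⟩
      rcases hl : rules.filter (fun r => !(pvTruthy (pvGet r "engine"))) with _ | _
      · rw [hl] at this; simp at this
      · rfl
    rw [hf3] at hflex
    rw [hgen]
    simp only [Bool.not_false]
    rw [if_pos trivial, hflex]
    have hge : ∀ x ∈ rules, 3 ≤ pvTier engine x := by
      intro x hx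
      have hr := pv_tier_range engine x
      have := hno1 x hx; have := hno2 x hx
      omega
    rw [pv_firstMin_of_find engine 3 r3 rules hge hf3]

-- ===== VERDICT (by name: the statement is the Claim_ definition above) =====
theorem pick_rule_py_spec : Claim_equal_pick_rule_py := by
  intro rules engine _ hpre
  unfold Spec_pick_rule_py
  rw [pv_alt_eq]
  unfold pick_rule_py
  by_cases hE : pvTruthy engine = true
  · rw [if_pos hE]
    rcases hf1 : rules.find? (fun r => pvTruthy (pvGet r "engine") && (pvGet r "engine" == engine)) with _ | r1
    · have hf1' : rules.find? (fun x => pvTier engine x == 1) = none := by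
        rw [← pv_find_congr _ _ rules (fun x _ => pv_tier1_iff engine hE x)]
        exact hf1
      have hno1 := pv_no_tier engine 1 rules hf1'
      rcases hf2 : rules.find? (fun r => (pvGet r "engine" == some "non-turbo") && !(engine == some "2.5T")) with _ | r2
      · have hf2' : rules.find? (fun x => pvTier engine x == 2) = none := by
          rw [← pv_find_congr _ _ rules (fun x hx => pv_tier2_iff engine hE x (hno1 x hx))]
          exact hf2
        have hno2 := pv_no_tier engine 2 rules hf2'
        exact pv_generic_part engine rules hpre hno1 hno2
      · have hf2' : rules.find? (fun x => pvTier engine x == 2) = some r2 := by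
          rw [← pv_find_congr _ _ rules (fun x hx => pv_tier2_iff engine hE x (hno1 x hx))]
          exact hf2
        have hge : ∀ x ∈ rules, 2 ≤ pvTier engine x := by
          intro x hx
          have hr := pv_tier_range engine x
          have := hno1 x hx
          omega
        rw [pv_firstMin_of_find engine 2 r2 rules hge hf2']
    · have hf1' : rules.find? (fun x => pvTier engine x == 1) = some r1 := by
        rw [← pv_find_congr _ _ rules (fun x _ => pv_tier1_iff engine hE x)]
        exact hf1
      have hge : ∀ x ∈ rules, 1 ≤ pvTier engine x := fun x _ => (pv_tier_range engine x).1
      rw [pv_firstMin_of_find engine 1 r1 rules hge hf1']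
  · rw [if_neg hE]
    have hno1 : ∀ x ∈ rules, pvTier engine x ≠ 1 := fun x _ => (pv_tier_ge3 engine hE x).1
    have hno2 : ∀ x ∈ rules, pvTier engine x ≠ 2 := fun x _ => (pv_tier_ge3 engine hE x).2
    exact pv_generic_part engine rules hpre hno1 hno2
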